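-- pv_equiv track=rewrite | github.com/cyrillus31/adventofcode | 2023/1/2main.py | get_two_digits
-- ===== SOURCE A (Python) =====
-- digits = {
--         "one": ("one", "1"),
--         "two": ("two", "2"),
--         "thr": ('three', "3"),
--         "fou": ('four', "4"),
--         "fiv": ('five', "5"),
--         "six": ('six', "6"),
--         "sev": ('seven', "7"),
--         "eig": ('eight', "8"),
--         "nin": ('nine', "9"),
--         }
--
-- def get_two_digits(line: str) -> int:
--     d = {'first': "0", 'last': "0"}
--     first_found = False
--     start = 0
--     full = "00000"
--     for index, char in enumerate(line):
--         if char.isdigit():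
--             d['last'] = char
--             if not first_found:
--                 d['first'] = char
--                 first_found = True
--         end = index
--         string = line[start:(end+1)]
--         if len(string) == 3:
--             if string in digits:
--                 full = digits[string][0]
--                 l = len(full)
--                 if line[start: start+l] == full:
--                     d['last'] = digits[string][1]
--                     if not first_found:
--                         d['first'] = digits[string][1]
--                         first_found = True
--             start += 1
--     result = int(d.get('first', '0') + d.get('last', '0'))
--     return result
-- ===== SOURCE B (Python) =====
-- WORDS = [("one", "1"), ("two", "2"), ("three", "3"), ("four", "4"),
--          ("five", "5"), ("six", "6"), ("seven", "7"), ("eight", "8"),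
--          ("nine", "9")]
--
--
-- def _word_at(line, i):
--     for word, dig in WORDS:
--         if line.startswith(word, i):
--             return dig
--     return None
--
--
-- def get_two_digits(line: str) -> int:
--     first = None
--     last = None
--     for i, c in enumerate(line):
--         if c.isdigit():
--             last = c
--             if first is None:
--                 first = c
--         else:
--             d = _word_at(line, i)
--             if d is not None:
--                 last = d
--                 if first is None:
--                     first = d
--     return int((first or "0") + (last or "0"))
-- ===== Notes on version B (the rewrite author's own statement) =====
-- stated objective: simpler
-- what changed: Replaces A's 3-char sliding window, abbreviation dict, start pointer and lookahead slice with a direct per-position scan that tries the nine spelled digits with startswith at each index, tracking first/last as Optionals.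
import Mathlib
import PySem

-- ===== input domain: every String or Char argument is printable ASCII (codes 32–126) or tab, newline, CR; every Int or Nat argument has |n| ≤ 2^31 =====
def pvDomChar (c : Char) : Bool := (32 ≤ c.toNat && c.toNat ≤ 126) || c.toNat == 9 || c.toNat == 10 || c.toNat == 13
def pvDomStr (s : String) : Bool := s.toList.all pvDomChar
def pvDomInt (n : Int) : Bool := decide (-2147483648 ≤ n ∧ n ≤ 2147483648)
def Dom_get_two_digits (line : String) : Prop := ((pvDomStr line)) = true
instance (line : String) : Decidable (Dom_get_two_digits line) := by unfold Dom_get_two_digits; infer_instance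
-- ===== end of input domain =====

-- B replaces A's 3-char sliding window + abbreviation dict + lookahead slice by a direct
-- per-position "digit or spelled word starts here" scan (objective: simpler).

-- ===== PORT A =====
-- the module-level 'digits' dict (3-char abbreviation -> (full word, digit))
def pvDigits : PySem.Dict (List Char) (List Char × String) :=
  PySem.Dict.ofList [
    ("one".toList, ("one".toList, "1")),
    ("two".toList, ("two".toList, "2")),
    ("thr".toList, ("three".toList, "3")),
    ("fou".toList, ("four".toList, "4")),
    ("fiv".toList, ("five".toList, "5")),
    ("six".toList, ("six".toList, "6")),
    ("sev".toList, ("seven".toList, "7")),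
    ("eig".toList, ("eight".toList, "8")),
    ("nin".toList, ("nine".toList, "9"))]

-- the loop body of A
def pvStepA (s : List Char) :
    (PySem.Dict String String × Bool × Int × List Char) → (Int × Char) →
    (PySem.Dict String String × Bool × Int × List Char)
  | (d, ff, start, full), (index, char) =>
    let p1 : PySem.Dict String String × Bool :=
      if PySem.Chars.isdigit char then
        let d1 := d.insert "last" (String.mk [char])
        if !ff then (d1.insert "first" (String.mk [char]), true) else (d1, ff)
      else (d, ff)
    let d := p1.1
    let ff := p1.2
    let string := PySem.List.slice s (some start) (some (index + 1))
    if string.length = 3 then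
      match pvDigits.get? string with
      | some fd =>
        if PySem.List.slice s (some start) (some (start + (fd.1.length : Int))) = fd.1 then
          let d2 := d.insert "last" fd.2
          let p2 : PySem.Dict String String × Bool :=
            if !ff then (d2.insert "first" fd.2, true) else (d2, ff)
          (p2.1, p2.2, start + 1, fd.1)
        else (d, ff, start + 1, fd.1)
      | none => (d, ff, start + 1, full)
    else (d, ff, start, full)

def get_two_digits (line : String) : Int :=
  let s := line.toList
  let st := (PySem.List.enumerate s 0).foldl (pvStepA s)
    (PySem.Dict.ofList [("first", "0"), ("last", "0")], false, 0, "00000".toList)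
  -- int(...): the argument is always two digit characters, so int() never raises here
  (PySem.Int.ofStr? (st.1.getD "first" "0" ++ st.1.getD "last" "0")).getD 0

-- ===== PORT B =====
def pvWords : List (List Char × String) :=
  [("one".toList, "1"), ("two".toList, "2"), ("three".toList, "3"),
   ("four".toList, "4"), ("five".toList, "5"), ("six".toList, "6"),
   ("seven".toList, "7"), ("eight".toList, "8"), ("nine".toList, "9")]

-- _word_at(line, i): first spelled digit starting at i (t = line[i:] as a char list);
-- line.startswith(word, i) with 0 ≤ i is exactly 'startswith (s.drop i) word'
def pvWordAt : List (List Char × String) → List Char → Option String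
  | [], _ => none
  | (w, dg) :: rest, t =>
    if PySem.Chars.startswith t w then some dg else pvWordAt rest t

def pvStepB (s : List Char) (st : Option String × Option String) (p : Int × Char) :
    Option String × Option String :=
  if PySem.Chars.isdigit p.2 then
    (some (st.1.getD (String.mk [p.2])), some (String.mk [p.2]))
  else
    match pvWordAt pvWords (s.drop p.1.toNat) with
    | some dg => (some (st.1.getD dg), some dg)
    | none => st

def get_two_digits_alt (line : String) : Int :=
  let s := line.toList
  let st := (PySem.List.enumerate s 0).foldl (pvStepB s) (none, none)
  -- int(...): the argument is always two digit characters, so int() never raises here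
  (PySem.Int.ofStr? (st.1.getD "0" ++ st.2.getD "0")).getD 0

-- ===== PRECONDITION & SPEC =====
def Spec_get_two_digits (line : String) (out : Int) : Prop := out = get_two_digits_alt line
instance (line : String) (out : Int) : Decidable (Spec_get_two_digits line out) := by unfold Spec_get_two_digits; infer_instance

-- ===== CLAIM (what is proved, stated in full; the proofs are below) =====
def Claim_equal_get_two_digits : Prop := ∀ (line : String), Dom_get_two_digits line → Spec_get_two_digits line (get_two_digits line)

-- ===== LEMMAS AND PROOFS =====

-- abstract events: update first/last with x
def pvUpd (x : String) (st : Option String × Option String) : Option String × Option String :=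
  (some (st.1.getD x), some x)

-- spelled digit starting at position j, position-j digit event
def pvW (s : List Char) (j : Nat) : Option String := pvWordAt pvWords (s.drop j)

def pvAW (s : List Char) (j : Nat) (st : Option String × Option String) :
    Option String × Option String :=
  match pvW s j with
  | some dg => pvUpd dg st
  | none => st

def pvAD (s : List Char) (j : Nat) (st : Option String × Option String) :
    Option String × Option String :=
  match s[j]? with
  | some c => if PySem.Chars.isdigit c then pvUpd (String.mk [c]) st else st
  | none => st

-- the word events B has already processed but A has not yet (positions m-2, m-1)
def pvPend (s : List Char) : Nat → (Option String × Option String) → (Option String × Option String)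
  | 0, st => st
  | 1, st => pvAW s 0 st
  | (k+2), st => pvAW s (k+1) (pvAW s k st)

def pvView (ff : Bool) (f l : String) : Option String × Option String :=
  if ff then (some f, some l) else (none, none)

def pvViewD (d : PySem.Dict String String) (ff : Bool) : Option String × Option String :=
  pvView ff (d.getD "first" "0") (d.getD "last" "0")

def pvInitA : PySem.Dict String String × Bool × Int × List Char :=
  (PySem.Dict.ofList [("first", "0"), ("last", "0")], false, 0, "00000".toList)

def pvAfold (s : List Char) (m : Nat) : PySem.Dict String String × Bool × Int × List Char :=
  (PySem.List.enumerate (s.take m) 0).foldl (pvStepA s) pvInitA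

def pvBfold (s : List Char) (m : Nat) : Option String × Option String :=
  (PySem.List.enumerate (s.take m) 0).foldl (pvStepB s) (none, none)

-- ---- word-list facts ----

lemma pvWordAt_none (t : List Char) (ws : List (List Char × String))
    (h : ∀ e ∈ ws, ¬ (e.1 <+: t)) : pvWordAt ws t = none := by
  induction ws with
  | nil => rfl
  | cons e rest ih =>
    obtain ⟨w, dg⟩ := e
    have hw : ¬ (w <+: t) := h (w, dg) (by simp)
    simp [pvWordAt, PySem.Chars.startswith_iff, hw]
    exact ih (fun e he => h e (by simp [he]))

lemma take3_of_prefix {w t : List Char} (h : w <+: t) (h3 : 3 ≤ w.length) :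
    t.take 3 = w.take 3 := by
  obtain ⟨u, rfl⟩ := h
  rw [List.take_append]
  have : 3 - w.length = 0 := by omega
  simp [this]

lemma pvWordAt_some_imp {t : List Char} {dg : String}
    (h : pvWordAt pvWords t = some dg) :
    ∃ w, (w, dg) ∈ pvWords ∧ w <+: t := by
  have : ∀ (ws : List (List Char × String)), pvWordAt ws t = some dg →
      ∃ w, (w, dg) ∈ ws ∧ w <+: t := by
    intro ws
    induction ws with
    | nil => intro h; simp [pvWordAt] at h
    | cons e rest ih =>
      obtain ⟨w', dg'⟩ := e
      intro h
      by_cases hs : PySem.Chars.startswith t w' = true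
      · simp [pvWordAt, hs] at h
        exact ⟨w', by simp [h], (PySem.Chars.startswith_iff t w').1 hs⟩
      · simp [pvWordAt, hs] at h
        obtain ⟨w, hw, hp⟩ := ih h
        exact ⟨w, by simp [hw], hp⟩
  exact this pvWords h

lemma pvW_none_of_short (s : List Char) (j : Nat) (h : s.length < j + 3) :
    pvW s j = none := by
  apply pvWordAt_none
  intro e he hp
  have hlen : e.1.length ≤ (s.drop j).length := hp.length_le
  have h3 : 3 ≤ e.1.length := by
    fin_cases he <;> decide
  simp [List.length_drop] at hlen
  omega

lemma pvW_not_digit {s : List Char} {j : Nat} {dg : String}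
    (h : pvW s j = some dg) (k : Nat) (hk : k < 3) {c : Char}
    (hc : s[j + k]? = some c) : PySem.Chars.isdigit c = false := by
  obtain ⟨w, hw, hp⟩ := pvWordAt_some_imp h
  have h3 : 3 ≤ w.length := by fin_cases hw <;> decide
  have hklt : k < w.length := by omega
  have hget : (s.drop j)[k]? = some w[k] := by
    obtain ⟨u, hu⟩ := hp
    rw [← hu]
    rw [List.getElem?_append_left (by omega)]
    simp
  rw [List.getElem?_drop] at hget
  rw [hc] at hget
  obtain rfl : c = w[k] := by injection hget
  have : ∀ i (hi : i < w.length), PySem.Chars.isdigit w[i] = false := by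
    fin_cases hw <;> decide
  exact this k hklt

-- ---- A's window test equals B's word scan ----

lemma prefix_iff_take {w t : List Char} : w <+: t ↔ t.take w.length = w := by
  constructor
  · intro h; exact (List.prefix_iff_eq_take.1 h).symm
  · intro h; rw [← h]; exact List.take_prefix _ _

lemma chainAux (t : List Char) :
    ∀ (es : List (List Char × (List Char × String))),
      (∀ e ∈ es, e.1 = e.2.1.take 3 ∧ 3 ≤ e.2.1.length) →
      (es.map (·.1)).Nodup →
      (match (PySem.Dict.mk es).get? (t.take 3) with
       | some fd => if t.take fd.1.length = fd.1 then some fd.2 else none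
       | none => none)
      = pvWordAt (es.map (·.2)) t := by
  intro es
  induction es with
  | nil => intro _ _; simp [pvWordAt, PySem.Dict.get?]
  | cons e rest ih =>
    obtain ⟨key, w, dg⟩ := e
    intro hgood hnd
    have hkey : key = w.take 3 := (hgood (key, w, dg) (List.mem_cons_self)).1
    have hwl : 3 ≤ w.length := (hgood (key, w, dg) (List.mem_cons_self)).2
    rw [PySem.Dict.get?_mk_cons]
    simp only [List.map_cons, pvWordAt]
    by_cases hk : key = t.take 3
    · have hcond : (key == t.take 3) = true := beq_iff_eq.2 hk
      rw [hcond, if_pos rfl]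
      dsimp only
      by_cases hp : w <+: t
      · have hs : PySem.Chars.startswith t w = true := (PySem.Chars.startswith_iff t w).2 hp
        rw [if_pos (prefix_iff_take.1 hp), hs, if_pos rfl]
      · have hs : PySem.Chars.startswith t w = false := by
          rw [← Bool.not_eq_true, PySem.Chars.startswith_iff]; exact hp
        have hne : t.take w.length ≠ w := fun hc => hp (prefix_iff_take.2 hc)
        rw [if_neg hne, hs, if_neg Bool.false_ne_true]
        symm
        apply pvWordAt_none
        intro e' he' hp'
        obtain ⟨e0, he0, rfl⟩ := List.mem_map.1 he'
        have hg0 := hgood e0 (List.mem_cons_of_mem _ he0)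
        have htk : t.take 3 = e0.2.1.take 3 := take3_of_prefix hp' hg0.2
        have hnd' := (List.nodup_cons.1 hnd).1
        have hkeq : key = e0.1 := by rw [hk, htk, hg0.1]
        apply hnd'
        rw [hkeq]
        exact List.mem_map.2 ⟨e0, he0, rfl⟩
    · have hcond : (key == t.take 3) = false := by simp [hk]
      rw [hcond, if_neg Bool.false_ne_true]
      have hs : PySem.Chars.startswith t w = false := by
        rw [← Bool.not_eq_true, PySem.Chars.startswith_iff]
        intro hp
        exact hk (by rw [hkey, ← take3_of_prefix hp hwl])
      rw [hs, if_neg Bool.false_ne_true]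
      exact ih (fun e he => hgood e (List.mem_cons_of_mem _ he)) (List.nodup_cons.1 hnd).2

def pvEntries : List (List Char × (List Char × String)) :=
  [("one".toList, ("one".toList, "1")),
   ("two".toList, ("two".toList, "2")),
   ("thr".toList, ("three".toList, "3")),
   ("fou".toList, ("four".toList, "4")),
   ("fiv".toList, ("five".toList, "5")),
   ("six".toList, ("six".toList, "6")),
   ("sev".toList, ("seven".toList, "7")),
   ("eig".toList, ("eight".toList, "8")),
   ("nin".toList, ("nine".toList, "9"))]

lemma pvDigits_eq : pvDigits = PySem.Dict.mk pvEntries := by decide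

lemma pvWords_eq : pvWords = pvEntries.map (·.2) := by decide

lemma wordTest_eq (t : List Char) :
    (match pvDigits.get? (t.take 3) with
     | some fd => if t.take fd.1.length = fd.1 then some fd.2 else none
     | none => none)
    = pvWordAt pvWords t := by
  rw [pvDigits_eq, pvWords_eq]
  exact chainAux t pvEntries (by decide) (by decide)

-- ---- step characterisations ----

lemma stepB_eq (s : List Char) (m : Nat) (c : Char) (hc : s[m]? = some c)
    (st : Option String × Option String) :
    pvStepB s st ((m : Int), c) = pvAW s m (pvAD s m st) := by
  unfold pvStepB pvAW pvAD
  simp only [hc, Int.toNat_natCast]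
  by_cases hd : PySem.Chars.isdigit c = true
  · have hw : pvW s m = none := by
      cases hW : pvW s m with
      | none => rfl
      | some dg =>
        have := pvW_not_digit hW 0 (by omega) (by simpa using hc)
        rw [hd] at this; cases this
    rw [show pvWordAt pvWords (s.drop m) = pvW s m from rfl, hw]
    simp [hd, pvUpd]
  · simp only [Bool.not_eq_true] at hd
    rw [show pvWordAt pvWords (s.drop m) = pvW s m from rfl]
    simp only [hd]
    cases hW : pvW s m <;> simp [pvUpd]

-- commute a digit event at m past a word event at j, j < m ≤ j+2
lemma AD_AW_comm (s : List Char) (j m : Nat) (hj : j < m) (h2 : m ≤ j + 2)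
    (st : Option String × Option String) :
    pvAD s m (pvAW s j st) = pvAW s j (pvAD s m st) := by
  cases hW : pvW s j with
  | none => simp [pvAW, hW]
  | some dg =>
    have hnd : ∀ c, s[m]? = some c → PySem.Chars.isdigit c = false := by
      intro c hc
      exact pvW_not_digit hW (m - j) (by omega) (by rw [show j + (m - j) = m by omega]; exact hc)
    have : pvAD s m = fun st => st := by
      funext st
      unfold pvAD
      cases hc : s[m]? with
      | none => rfl
      | some c => simp [hnd c hc]
    rw [this]

-- A's in-place dict update viewed through first/last
lemma view_updA (d : PySem.Dict String String) (ff : Bool) (x : String) :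
    pvViewD (if !ff then ((d.insert "last" x).insert "first" x, true)
             else (d.insert "last" x, ff)).1
            (if !ff then ((d.insert "last" x).insert "first" x, true)
             else (d.insert "last" x, ff)).2
      = pvUpd x (pvViewD d ff) := by
  cases ff <;>
    simp [pvViewD, pvView, pvUpd, PySem.Dict.getD_insert]

-- ---- step evaluation lemmas ----

lemma wordTest_some {t : List Char} {dg : String}
    (hW : pvWordAt pvWords t = some dg) :
    ∃ fd, pvDigits.get? (t.take 3) = some fd ∧ t.take fd.1.length = fd.1 ∧ fd.2 = dg := by
  have h := wordTest_eq t
  rw [hW] at h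
  cases hg : pvDigits.get? (t.take 3) with
  | none => rw [hg] at h; simp at h
  | some fd =>
    rw [hg] at h
    dsimp only at h
    by_cases hc : t.take fd.1.length = fd.1
    · rw [if_pos hc] at h
      exact ⟨fd, rfl, hc, by injection h⟩
    · rw [if_neg hc] at h; simp at h

lemma wordTest_none {t : List Char}
    (hW : pvWordAt pvWords t = none) :
    ∀ fd, pvDigits.get? (t.take 3) = some fd → t.take fd.1.length ≠ fd.1 := by
  intro fd hg hc
  have h := wordTest_eq t
  rw [hW, hg] at h
  dsimp only at h
  rw [if_pos hc] at h
  simp at h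

lemma p1_spec (s : List Char) (m : Nat) (hm : m < s.length)
    (d : PySem.Dict String String) (ff : Bool) :
    pvViewD (if PySem.Chars.isdigit s[m] then
               (if !ff then (((d.insert "last" (String.mk [s[m]])).insert "first" (String.mk [s[m]])), true)
                else ((d.insert "last" (String.mk [s[m]])), ff))
             else (d, ff)).1
            (if PySem.Chars.isdigit s[m] then
               (if !ff then (((d.insert "last" (String.mk [s[m]])).insert "first" (String.mk [s[m]])), true)
                else ((d.insert "last" (String.mk [s[m]])), ff))
             else (d, ff)).2
      = pvAD s m (pvViewD d ff)
    ∧ ((if PySem.Chars.isdigit s[m] then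
               (if !ff then (((d.insert "last" (String.mk [s[m]])).insert "first" (String.mk [s[m]])), true)
                else ((d.insert "last" (String.mk [s[m]])), ff))
             else (d, ff)).2 = false →
        (if PySem.Chars.isdigit s[m] then
               (if !ff then (((d.insert "last" (String.mk [s[m]])).insert "first" (String.mk [s[m]])), true)
                else ((d.insert "last" (String.mk [s[m]])), ff))
             else (d, ff)) = (d, ff)) := by
  have hget : s[m]? = some s[m] := List.getElem?_eq_getElem hm
  by_cases hd : PySem.Chars.isdigit s[m] = true
  · rw [if_pos hd]
    constructor
    · rw [view_updA d ff (String.mk [s[m]])]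
      unfold pvAD
      rw [hget]
      dsimp only
      rw [if_pos hd]
    · cases ff with
      | true => intro h; simp at h
      | false => intro h; simp at h
  · rw [if_neg hd]
    refine ⟨?_, fun _ => rfl⟩
    unfold pvAD
    rw [hget]
    dsimp only
    simp only [Bool.not_eq_true] at hd
    rw [hd]
    simp

lemma fold_succ {α : Type} (s : List Char) (f : α → Int × Char → α) (init : α)
    (m : Nat) (hm : m < s.length) :
    (PySem.List.enumerate (s.take (m+1)) 0).foldl f init =
      f ((PySem.List.enumerate (s.take m) 0).foldl f init) ((m : Int), s[m]) := by
  rw [List.take_succ, List.getElem?_eq_getElem hm]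
  simp only [Option.toList_some]
  rw [PySem.List.enumerate_append, List.foldl_append]
  simp only [PySem.List.enumerate_cons, PySem.List.enumerate_nil, List.foldl_cons,
             List.foldl_nil, List.length_take]
  norm_num [Nat.min_eq_left (le_of_lt hm)]

lemma ifpair_snd_true {α : Type} (a b : α) (ff : Bool) :
    ((if !ff then (a, true) else (b, ff)).2) = true := by
  cases ff <;> simp

lemma stepA_spec (s : List Char) (d : PySem.Dict String String) (ff : Bool) (fl : List Char)
    (m : Nat) (hm : m < s.length) :
    ∃ d' ff' fl',
      pvStepA s (d, ff, ((m - 2 : Nat) : Int), fl) ((m : Int), s[m]) =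
        (d', ff', ((m + 1 - 2 : Nat) : Int), fl') ∧
      (ff' = false → d' = d ∧ ff = false) ∧
      pvViewD d' ff' = (if 2 ≤ m then pvAW s (m-2) (pvAD s m (pvViewD d ff))
                        else pvAD s m (pvViewD d ff)) := by
  obtain ⟨hview1, hp1⟩ := p1_spec s m hm d ff
  rcases m with _ | _ | k
  · -- m = 0 : window has length 1, no word check
    have hsl : PySem.List.slice s (some ((0 - 2 : Nat) : Int)) (some (((0 : Nat) : Int) + 1))
        = s.take 1 := by
      rw [show ((0 - 2 : Nat) : Int) = ((0 : Nat) : Int) from rfl,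
          show ((0 : Nat) : Int) + 1 = ((1 : Nat) : Int) from by norm_num,
          PySem.List.slice_natCast]
      simp
    have hlen : ¬ ((s.take 1).length = 3) := by
      rw [List.length_take]; omega
    unfold pvStepA
    dsimp only
    rw [hsl, if_neg hlen]
    refine ⟨_, _, fl, rfl, ?_, ?_⟩
    · intro h
      have hpe := hp1 h
      rw [hpe] at h
      exact ⟨by rw [hpe], h⟩
    · rw [if_neg (show ¬ (2 ≤ 0) by omega)]
      exact hview1
  · -- m = 1 : window has length 2, no word check
    have hsl : PySem.List.slice s (some ((1 - 2 : Nat) : Int)) (some (((1 : Nat) : Int) + 1))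
        = s.take 2 := by
      rw [show ((1 - 2 : Nat) : Int) = ((0 : Nat) : Int) from rfl,
          show ((1 : Nat) : Int) + 1 = ((2 : Nat) : Int) from by norm_num,
          PySem.List.slice_natCast]
      simp
    have hlen : ¬ ((s.take 2).length = 3) := by
      rw [List.length_take]; omega
    unfold pvStepA
    dsimp only
    rw [hsl, if_neg hlen]
    refine ⟨_, _, fl, rfl, ?_, ?_⟩
    · intro h
      have hpe := hp1 h
      rw [hpe] at h
      exact ⟨by rw [hpe], h⟩
    · rw [if_neg (show ¬ (2 ≤ 0 + 1) by omega)]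
      exact hview1
  · -- m = k+2 : window is s[k:k+3], A runs its abbreviation-dict test at position k
    have hstart : ((k + 1 + 1 - 2 : Nat) : Int) = ((k : Nat) : Int) := by omega
    have hidx : ((k + 1 + 1 : Nat) : Int) + 1 = ((k + 3 : Nat) : Int) := by push_cast; ring
    have hsl1 : PySem.List.slice s (some ((k : Nat) : Int)) (some ((k + 3 : Nat) : Int))
        = (s.drop k).take 3 := by
      rw [PySem.List.slice_natCast, show k + 3 - k = 3 from by omega]
    have hlen : ((s.drop k).take 3).length = 3 := by
      rw [List.length_take, List.length_drop]; omega
    unfold pvStepA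
    dsimp only
    rw [hstart, hidx, hsl1, if_pos hlen]
    cases hW : pvW s k with
    | some dg =>
      obtain ⟨fd, hg, hcond, hfd2⟩ := wordTest_some (show pvWordAt pvWords (s.drop k) = some dg from hW)
      rw [hg]
      dsimp only
      rw [PySem.List.slice_natCast_add, if_pos hcond]
      rw [show ((k : Nat) : Int) + 1 = ((k + 1 + 1 + 1 - 2 : Nat) : Int) from by omega]
      refine ⟨_, _, fd.1, rfl, ?_, ?_⟩
      · intro h
        rw [ifpair_snd_true] at h
        cases h
      · rw [if_pos (show 2 ≤ k + 1 + 1 by omega)]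
        show _ = pvAW s k (pvAD s (k+1+1) (pvViewD d ff))
        rw [← hview1]
        unfold pvAW
        rw [hW, ← hfd2]
        exact view_updA _ _ fd.2
    | none =>
      have hanyg : ∀ fd, pvDigits.get? ((s.drop k).take 3) = some fd →
          (s.drop k).take fd.1.length ≠ fd.1 :=
        wordTest_none (show pvWordAt pvWords (s.drop k) = none from hW)
      have hfin : ∀ (fl' : List Char),
          (∃ d' ff' fl'', ((if PySem.Chars.isdigit s[k+1+1] then
               (if !ff then (((d.insert "last" (String.mk [s[k+1+1]])).insert "first" (String.mk [s[k+1+1]])), true)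
                else ((d.insert "last" (String.mk [s[k+1+1]])), ff))
             else (d, ff)).1,
             (if PySem.Chars.isdigit s[k+1+1] then
               (if !ff then (((d.insert "last" (String.mk [s[k+1+1]])).insert "first" (String.mk [s[k+1+1]])), true)
                else ((d.insert "last" (String.mk [s[k+1+1]])), ff))
             else (d, ff)).2, ((k : Nat) : Int) + 1, fl')
              = (d', ff', ((k + 1 + 1 + 1 - 2 : Nat) : Int), fl'') ∧
            (ff' = false → d' = d ∧ ff = false) ∧
            pvViewD d' ff' = (if 2 ≤ k+1+1 then pvAW s (k+1+1-2) (pvAD s (k+1+1) (pvViewD d ff))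
                        else pvAD s (k+1+1) (pvViewD d ff))) := by
        intro fl'
        rw [show ((k : Nat) : Int) + 1 = ((k + 1 + 1 + 1 - 2 : Nat) : Int) from by omega]
        refine ⟨_, _, fl', rfl, ?_, ?_⟩
        · intro h
          have hpe := hp1 h
          rw [hpe] at h
          exact ⟨by rw [hpe], h⟩
        · rw [if_pos (show 2 ≤ k + 1 + 1 by omega)]
          show _ = pvAW s k (pvAD s (k+1+1) (pvViewD d ff))
          rw [← hview1]
          unfold pvAW
          rw [hW]
      cases hg : pvDigits.get? ((s.drop k).take 3) with
      | none =>
        exact hfin fl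
      | some fd =>
        dsimp only
        rw [PySem.List.slice_natCast_add, if_neg (hanyg fd hg)]
        exact hfin fd.1

-- ---- main invariant ----

lemma main_inv (s : List Char) : ∀ m, m ≤ s.length →
    ∃ d ff fl,
      pvAfold s m = (d, ff, ((m - 2 : Nat) : Int), fl) ∧
      (ff = false → d.getD "first" "0" = "0" ∧ d.getD "last" "0" = "0") ∧
      pvBfold s m = pvPend s m (pvViewD d ff) := by
  intro m
  induction m with
  | zero =>
    intro _
    refine ⟨(PySem.Dict.ofList [("first", "0"), ("last", "0")]), false, "00000".toList, ?_, ?_, ?_⟩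
    · simp [pvAfold, pvInitA]
    · intro _; constructor <;> decide
    · simp [pvBfold, pvPend, pvViewD, pvView]
  | succ m ih =>
    intro hm1
    have hmlt : m < s.length := by omega
    obtain ⟨d, ff, fl, hA, hff, hB⟩ := ih (by omega)
    obtain ⟨d', ff', fl', hstep, hff', hview⟩ := stepA_spec s d ff fl m hmlt
    refine ⟨d', ff', fl', ?_, ?_, ?_⟩
    · unfold pvAfold
      rw [fold_succ s (pvStepA s) pvInitA m hmlt]
      rw [show (PySem.List.enumerate (s.take m) 0).foldl (pvStepA s) pvInitA = pvAfold s m from rfl]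
      rw [hA, hstep]
    · intro h
      obtain ⟨rfl, hf⟩ := hff' h
      exact hff hf
    · unfold pvBfold
      rw [fold_succ s (pvStepB s) (none, none) m hmlt]
      rw [show (PySem.List.enumerate (s.take m) 0).foldl (pvStepB s) (none, none) = pvBfold s m from rfl]
      rw [hB]
      rw [stepB_eq s m s[m] (List.getElem?_eq_getElem hmlt)]
      rw [hview]
      rcases m with _ | _ | k
      · simp [pvPend]
      · rw [if_neg (by omega)]
        show pvAW s 1 (pvAD s 1 (pvAW s 0 (pvViewD d ff))) = pvAW s 1 (pvAW s 0 (pvAD s 1 (pvViewD d ff)))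
        rw [AD_AW_comm s 0 1 (by omega) (by omega)]
      · rw [if_pos (by omega)]
        show pvAW s (k+2) (pvAD s (k+2) (pvAW s (k+1) (pvAW s k (pvViewD d ff))))
           = pvAW s (k+2) (pvAW s (k+1) (pvAW s (k+2-2) (pvAD s (k+2) (pvViewD d ff))))
        rw [show k+2-2 = k from rfl]
        rw [AD_AW_comm s (k+1) (k+2) (by omega) (by omega)]
        rw [AD_AW_comm s k (k+2) (by omega) (by omega)]

lemma pend_final (s : List Char) (st : Option String × Option String) :
    pvPend s s.length st = st := by
  rcases hn : s.length with _ | _ | k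
  · rfl
  · show pvAW s 0 st = st
    unfold pvAW
    rw [pvW_none_of_short s 0 (by omega)]
  · show pvAW s (k+1) (pvAW s k st) = st
    unfold pvAW
    rw [pvW_none_of_short s (k+1) (by omega), pvW_none_of_short s k (by omega)]

-- ===== VERDICT (by name: the statement is the Claim_ definition above) =====
theorem get_two_digits_spec : Claim_equal_get_two_digits := by
  intro line _
  unfold Spec_get_two_digits get_two_digits get_two_digits_alt
  obtain ⟨d, ff, fl, hA, hff, hB⟩ := main_inv line.toList line.toList.length (le_refl _)
  have hA' : (PySem.List.enumerate line.toList 0).foldl (pvStepA line.toList)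
      (PySem.Dict.ofList [("first", "0"), ("last", "0")], false, 0, "00000".toList)
      = (d, ff, ((line.toList.length - 2 : Nat) : Int), fl) := by
    rw [← hA]; unfold pvAfold pvInitA; rw [List.take_length]
  have hB' : (PySem.List.enumerate line.toList 0).foldl (pvStepB line.toList) (none, none)
      = pvViewD d ff := by
    rw [show (PySem.List.enumerate line.toList 0).foldl (pvStepB line.toList) (none, none)
          = pvBfold line.toList line.toList.length from by unfold pvBfold; rw [List.take_length]]
    rw [hB, pend_final]
  dsimp only
  rw [hA', hB']
  cases ff with
  | true => simp [pvViewD, pvView]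
  | false =>
    obtain ⟨h1, h2⟩ := hff rfl
    simp [pvViewD, pvView, h1, h2]
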